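-- pv_equiv track=rewrite | github.com/randreshg/carts | tools/scripts/agents.py | _generate_copilot_instructions
-- ===== SOURCE A (Python) =====
-- from typing import Dict, Iterable, List, Optional, Tuple
--
-- def _generate_copilot_instructions(claude_content: str) -> str:
--     """CLAUDE.md -> .github/copilot-instructions.md."""
--     lines = claude_content.splitlines()
--     output: List[str] = ["# CARTS Copilot Instructions", ""]
--
--     in_section = False
--     keep_sections = {"## Essential Commands", "## Project Layout", "## Coding Conventions", "## Key Architectural Concepts"}
--     rename_map = {"## Essential Commands": "## Build and Test", "## Key Architectural Concepts": "## Key Concepts", "## Project Layout": "## Architecture"}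
--
--     started = False
--     for line in lines:
--         if not started:
--             if line.startswith("## "):
--                 started = True
--             elif line and not line.startswith("#"):
--                 output.append(line)
--                 continue
--             else:
--                 continue
--
--         if line.startswith("## "):
--             in_section = line in keep_sections
--             if in_section and line in rename_map:
--                 output.append(rename_map[line])
--                 continue
--         if in_section:
--             output.append(line)
--
--     output.append("")
--     return "\n".join(output)
-- ===== SOURCE B (Python) =====
-- def _generate_copilot_instructions(claude_content: str) -> str:
--     """CLAUDE.md -> .github/copilot-instructions.md (two-phase rewrite)."""
--     keep_sections = {"## Essential Commands", "## Project Layout", "## Coding Conventions", "## Key Architectural Concepts"}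
--     rename_map = {"## Essential Commands": "## Build and Test", "## Key Architectural Concepts": "## Key Concepts", "## Project Layout": "## Architecture"}
--
--     lines = claude_content.splitlines()
--     output = ["# CARTS Copilot Instructions", ""]
--
--     # Phase 1: preamble = everything before the first '## ' header;
--     # keep only non-empty lines that are not '#...' comments/headers.
--     i = 0
--     while i < len(lines) and not lines[i].startswith("## "):
--         if lines[i] and not lines[i].startswith("#"):
--             output.append(lines[i])
--         i += 1
--
--     # Phase 2: partition the rest into sections (header + body up to next '## ').
--     while i < len(lines):
--         header = lines[i]
--         j = i + 1
--         while j < len(lines) and not lines[j].startswith("## "):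
--             j += 1
--         if header in keep_sections:
--             output.append(rename_map.get(header, header))
--             output.extend(lines[i + 1:j])
--         i = j
--
--     output.append("")
--     return "\n".join(output)
-- ===== Notes on version B (the rewrite author's own statement) =====
-- stated objective: alternative
-- what changed: Replaced A's single pass driven by started/in_section flags with a two-phase decomposition: a preamble scan up to the first section header, then a partition of the remainder into header+body sections that are kept (with renaming) or dropped wholesale.
import Mathlib
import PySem

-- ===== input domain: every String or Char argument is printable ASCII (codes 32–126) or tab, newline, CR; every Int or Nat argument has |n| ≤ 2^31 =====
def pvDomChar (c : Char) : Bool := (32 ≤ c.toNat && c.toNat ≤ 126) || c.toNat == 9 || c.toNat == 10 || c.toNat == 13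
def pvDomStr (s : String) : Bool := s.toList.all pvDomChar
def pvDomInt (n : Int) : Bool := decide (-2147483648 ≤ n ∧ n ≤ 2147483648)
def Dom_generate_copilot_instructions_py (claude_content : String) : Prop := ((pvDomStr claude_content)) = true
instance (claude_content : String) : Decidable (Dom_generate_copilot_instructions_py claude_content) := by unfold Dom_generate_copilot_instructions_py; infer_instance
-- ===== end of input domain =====

-- B replaces A's flag-driven single pass by a two-phase decomposition (preamble scan, then
-- section partition); objective: simpler/alternative structure, same output.

-- shared literal constants (both Pythons carry the same literals)
def pvKeepSections : PySem.Set String :=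
  PySem.Set.ofList ["## Essential Commands", "## Project Layout", "## Coding Conventions", "## Key Architectural Concepts"]
def pvRenameMap : PySem.Dict String String :=
  PySem.Dict.ofList [("## Essential Commands", "## Build and Test"), ("## Key Architectural Concepts", "## Key Concepts"), ("## Project Layout", "## Architecture")]

-- ===== PORT A =====
-- the body of A's loop once `started` is true (fall-through part of the loop)
def pvStepStarted (out : List String) (insec : Bool) (line : String) :
    List String × Bool × Bool :=
  if PySem.Str.startswith line "## " then
    let insec' := PySem.Set.contains pvKeepSections line
    if insec' && pvRenameMap.contains line then
      (out ++ [pvRenameMap.getD line line], insec', true)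
    else if insec' then (out ++ [line], insec', true)
    else (out, insec', true)
  else if insec then (out ++ [line], insec, true)
  else (out, insec, true)

def pvStepA (s : List String × Bool × Bool) (line : String) : List String × Bool × Bool :=
  match s with
  | (out, insec, started) =>
    if !started then
      if PySem.Str.startswith line "## " then pvStepStarted out insec line
      else if line != "" && !(PySem.Str.startswith line "#") then (out ++ [line], insec, false)
      else (out, insec, false)
    else pvStepStarted out insec line

def generate_copilot_instructions_py (claude_content : String) : String :=
  let lines := PySem.Str.splitlines claude_content
  let st := lines.foldl pvStepA (["# CARTS Copilot Instructions", ""], false, false)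
  PySem.Str.join "\n" (st.1 ++ [""])

-- ===== PORT B =====
-- phase 1: the filtered preamble (lines before the first '## ' header)
def pvPre : List String → List String
  | [] => []
  | l :: ls =>
    if PySem.Str.startswith l "## " then []
    else (if l != "" && !(PySem.Str.startswith l "#") then [l] else []) ++ pvPre ls

-- phase 1: the remaining lines, starting at the first '## ' header
def pvRest : List String → List String
  | [] => []
  | l :: ls => if PySem.Str.startswith l "## " then l :: ls else pvRest ls

-- phase 2: partition into sections (header + body up to next header); keep/rename
def pvSections : List String → List String
  | [] => []
  | h :: t =>
    let body := t.takeWhile (fun l => !(PySem.Str.startswith l "## "))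
    let rest := t.dropWhile (fun l => !(PySem.Str.startswith l "## "))
    (if PySem.Set.contains pvKeepSections h then pvRenameMap.getD h h :: body else [])
      ++ pvSections rest
  termination_by l => l.length
  decreasing_by
    have := (List.dropWhile_sublist (p := fun l => !(PySem.Str.startswith l "## ")) (l := t)).length_le
    simpa using Nat.lt_succ_of_le this

def generate_copilot_instructions_py_alt (claude_content : String) : String :=
  let lines := PySem.Str.splitlines claude_content
  PySem.Str.join "\n"
    (["# CARTS Copilot Instructions", ""] ++ pvPre lines ++ pvSections (pvRest lines) ++ [""])

-- ===== PRECONDITION & SPEC =====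
def Spec_generate_copilot_instructions_py (claude_content : String) (out : String) : Prop := out = generate_copilot_instructions_py_alt claude_content
instance (claude_content : String) (out : String) : Decidable (Spec_generate_copilot_instructions_py claude_content out) := by unfold Spec_generate_copilot_instructions_py; infer_instance

-- ===== CLAIM (what is proved, stated in full; the proofs are below) =====
def Claim_equal_generate_copilot_instructions_py : Prop := ∀ (claude_content : String), Dom_generate_copilot_instructions_py claude_content → Spec_generate_copilot_instructions_py claude_content (generate_copilot_instructions_py claude_content)

-- ===== LEMMAS AND PROOFS =====

lemma pvSections_nil : pvSections [] = [] := by rw [pvSections.eq_def]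

lemma pvSections_cons (h : String) (t : List String) :
    pvSections (h :: t) =
      (if PySem.Set.contains pvKeepSections h then
        pvRenameMap.getD h h :: t.takeWhile (fun l => !(PySem.Str.startswith l "## ")) else [])
        ++ pvSections (t.dropWhile (fun l => !(PySem.Str.startswith l "## "))) := by
  rw [pvSections.eq_def]

lemma pv_getD_self (l : String) (h : ¬ pvRenameMap.contains l = true) :
    pvRenameMap.getD l l = l := by
  have e : pvRenameMap = PySem.Dict.mk [("## Essential Commands", "## Build and Test"), ("## Key Architectural Concepts", "## Key Concepts"), ("## Project Layout", "## Architecture")] := by decide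
  rw [e] at h ⊢
  simp [PySem.Dict.contains_mk] at h
  obtain ⟨h1, h2, h3⟩ := h
  simp [PySem.Dict.getD, PySem.Dict.get?, h1, h2, h3]

-- the header case of A's started step, in closed form
lemma pv_stepStarted_header (out : List String) (insec : Bool) (l : String)
    (hP : PySem.Str.startswith l "## " = true) :
    pvStepStarted out insec l =
      (out ++ (if PySem.Set.contains pvKeepSections l then [pvRenameMap.getD l l] else []),
       PySem.Set.contains pvKeepSections l, true) := by
  unfold pvStepStarted
  rw [if_pos hP]
  by_cases hk : l ∈ pvKeepSections <;> by_cases hr : pvRenameMap.contains l = true <;>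
    simp [hk, hr, pv_getD_self]

-- A's loop after `started` became true equals: current section body (if inside a kept
-- section) followed by the phase-2 section partition of the rest.
lemma pv_foldl_started (ls : List String) (out : List String) (insec : Bool) :
    (ls.foldl pvStepA (out, insec, true)).1 =
      out ++ (if insec then ls.takeWhile (fun l => !(PySem.Str.startswith l "## ")) else [])
          ++ pvSections (ls.dropWhile (fun l => !(PySem.Str.startswith l "## "))) := by
  induction ls generalizing out insec with
  | nil => cases insec <;> simp [pvSections_nil]
  | cons l ls ih =>
    rw [List.foldl_cons]
    have hstepA : pvStepA (out, insec, true) l = pvStepStarted out insec l := rfl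
    by_cases hP : PySem.Str.startswith l "## " = true
    · have hP2 : PySem.Chars.startswith l.toList ['#', '#', ' '] = true := by simpa using hP
      rw [hstepA, pv_stepStarted_header out insec l hP, ih]
      by_cases hk : l ∈ pvKeepSections <;> cases insec <;> simp [hP2, hk, pvSections_cons]
    · have hP2 : PySem.Chars.startswith l.toList ['#', '#', ' '] = false := by
        simpa using hP
      have hstep : pvStepA (out, insec, true) l =
          (out ++ (if insec then [l] else []), insec, true) := by
        cases insec <;> simp [pvStepA, pvStepStarted, hP2]
      rw [hstep, ih]
      cases insec <;> simp [hP2]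

-- A's loop from the initial (not started) state equals filtered preamble ++ sections
lemma pv_foldl_unstarted (ls : List String) (out : List String) :
    (ls.foldl pvStepA (out, false, false)).1 =
      out ++ pvPre ls ++ pvSections (pvRest ls) := by
  induction ls generalizing out with
  | nil => simp [pvPre, pvRest, pvSections_nil]
  | cons l ls ih =>
    rw [List.foldl_cons]
    by_cases hP : PySem.Str.startswith l "## " = true
    · have hP2 : PySem.Chars.startswith l.toList ['#', '#', ' '] = true := by simpa using hP
      have hstep : pvStepA (out, false, false) l = pvStepStarted out false l := by
        simp [pvStepA, hP2]
      rw [hstep, pv_stepStarted_header out false l hP, pv_foldl_started]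
      by_cases hk : l ∈ pvKeepSections <;>
        simp [pvPre, pvRest, pvSections_cons, hP2, hk]
    · have hP2 : PySem.Chars.startswith l.toList ['#', '#', ' '] = false := by
        simpa using hP
      by_cases h1 : l = ""
      · simp [pvStepA, pvPre, pvRest, PySem.Chars.startswith, h1, ih]
      · by_cases h2 : PySem.Chars.startswith l.toList ['#'] = true <;>
          simp [pvStepA, pvPre, pvRest, hP2, h1, h2, ih]

-- ===== VERDICT (by name: the statement is the Claim_ definition above) =====
theorem generate_copilot_instructions_py_spec : Claim_equal_generate_copilot_instructions_py := by
  intro c _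
  unfold Spec_generate_copilot_instructions_py generate_copilot_instructions_py generate_copilot_instructions_py_alt
  simp [pv_foldl_unstarted]
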